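-- pv_equiv track=rewrite | github.com/ChristophePantel/ultralytics | ultralytics/utils/km.py | element_variants
-- ===== SOURCE A (Python) =====
-- def element_variants(element, relation):
--     singleton_element = frozenset({element})
--     if element in relation:
--         result = frozenset( {} )
--         for target in relation[element]:
--             for variant in element_variants( target, relation):
--                 result = result.union( { variant.union( singleton_element ) } )
--     else:
--         result = frozenset( { singleton_element } )
--     return result
-- ===== SOURCE B (Python) =====
-- def element_variants(element, relation):
--     # Iterative bottom-up DP restricted to the part of the relation reachable
--     # from `element`: expand the reachable set to a fixpoint, then relax a table
--     # of variant sets for the reachable keys (any acyclic dependency chain has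
--     # length <= len(relation)), instead of A's naive recursive re-expansion.
--     reach = frozenset({element})
--     while True:
--         new = reach
--         for x in reach:
--             if x in relation:
--                 new = new.union(relation[x])
--         if new == reach:
--             break
--         reach = new
--
--     def combine(e, table):
--         if e in relation:
--             merged = frozenset()
--             for t in relation[e]:
--                 merged |= table[t] if t in relation else frozenset({frozenset({t})})
--             return frozenset(v | {e} for v in merged)
--         return frozenset({frozenset({e})})
--
--     table = {k: frozenset() for k in relation if k in reach}
--     for _ in range(len(relation)):
--         new = {k: combine(k, table) for k in table}
--         if new == table:
--             break
--         table = new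
--     return combine(element, table)
-- ===== Notes on version B (the rewrite author's own statement) =====
-- stated objective: alternative
-- what changed: Replaces A's naive top-down recursion (which re-expands shared sub-elements exponentially often) by an iterative bottom-up dynamic program: the set of elements reachable from `element` is expanded to a fixpoint, then a table of variant sets for the reachable keys is relaxed (at most len(relation) rounds, stopping at a fixpoint) and the answer is read off with one final combine.
import Mathlib
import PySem

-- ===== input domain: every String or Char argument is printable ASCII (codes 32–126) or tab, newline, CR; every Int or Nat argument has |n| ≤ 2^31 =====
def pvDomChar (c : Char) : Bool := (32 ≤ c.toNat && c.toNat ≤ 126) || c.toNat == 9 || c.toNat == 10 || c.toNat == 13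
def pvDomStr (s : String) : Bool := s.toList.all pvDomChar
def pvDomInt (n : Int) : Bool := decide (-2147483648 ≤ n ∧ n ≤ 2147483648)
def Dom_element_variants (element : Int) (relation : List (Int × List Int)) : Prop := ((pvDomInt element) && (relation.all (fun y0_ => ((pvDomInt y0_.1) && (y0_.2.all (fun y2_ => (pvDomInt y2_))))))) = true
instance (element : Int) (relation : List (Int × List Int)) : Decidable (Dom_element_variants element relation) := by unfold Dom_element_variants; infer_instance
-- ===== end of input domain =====

-- B replaces A's naive exponential recursion by a bottom-up table DP over the part of
-- the relation reachable from `element`; equivalence of the RETURN value is proved below.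

-- ===== PORT A =====
-- Literal port of A's recursion; `fuel` is only the totality device (Python's
-- recursion is unbounded; `relation.length + 1` levels suffice on every input
-- admitted by Pre_, where the chain of keys visited is duplicate-free).
def evA (rel : PySem.Dict Int (List Int)) (fuel : Nat) (element : Int) : List (List Int) :=
  -- singleton_element = frozenset({element})
  let singleton : PySem.Set Int := PySem.Set.ofList [element]
  match rel.get? element with          -- 'if element in relation: ... relation[element]'
  | some targets =>
    match fuel with
    | 0 => []                          -- fuel exhausted (never reached under Pre_)
    | fuel' + 1 =>
      targets.foldl (fun result target =>
        (evA rel fuel' target).foldl (fun result variant =>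
          PySem.Set.union result (PySem.Set.ofList [PySem.Set.union variant singleton]))
          result)
        PySem.Set.empty                -- result = frozenset({})
  | none => PySem.Set.ofList [singleton]  -- frozenset({singleton_element})

def element_variants (element : Int) (relation : List (Int × List Int)) : List (List Int) :=
  evA (PySem.Dict.mk relation) (relation.length + 1) element

-- ===== PORT B =====
-- one pass of 'for x in reach: if x in relation: new = new.union(relation[x])'
def expandStep (rel : PySem.Dict Int (List Int)) (S : PySem.Set Int) : PySem.Set Int :=
  S.foldl (fun acc x => PySem.Set.union acc (rel.getD x [])) S

-- combine(e, table) of Source B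
def bCombine (rel : PySem.Dict Int (List Int)) (table : PySem.Dict Int (List (List Int)))
    (e : Int) : List (List Int) :=
  match rel.get? e with
  | some targets =>
    let merged := targets.foldl (fun merged t =>
        PySem.Set.union merged
          (match rel.get? t with       -- 'table[t] if t in relation else frozenset({frozenset({t})})'
           | some _ => table.getD t []
           | none => [[t]]))
      PySem.Set.empty
    PySem.Set.ofList (merged.map (fun v => PySem.Set.union v [e]))
  | none => PySem.Set.ofList [PySem.Set.ofList [e]]

def element_variants_alt (element : Int) (relation : List (Int × List Int)) : List (List Int) :=
  let rel := PySem.Dict.mk relation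
  -- reach = frozenset({element}); while True: new = expand(reach); if new == reach: break; reach = new
  -- (the Bool is the break flag; the fuel bound |universe|+1 is only the totality device:
  -- the lemmas below show the fixpoint is always reached within it)
  let rs := (List.range ((element :: (relation.map (fun kv => kv.2)).flatten).length + 1)).foldl
      (fun st _ =>
        if st.2 then st
        else
          let new := expandStep rel st.1
          if PySem.Set.equal new st.1 then (st.1, true) else (new, false))
      (PySem.Set.ofList [element], false)
  -- table = {k: frozenset() for k in relation if k in reach}
  let sub := relation.filter (fun kv => PySem.Set.contains rs.1 kv.1)
  let init := sub.foldl (fun d kv => d.insert kv.1 []) (PySem.Dict.mk [])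
  -- for _ in range(len(relation)): new = {k: combine(k, table) for k in table};
  --                                if new == table: break; table = new
  -- ('new == table' is ported as Dict equality, which may fire later than Python's
  -- set-valued dict '=='; the lemmas below prove the returned value equals that of the
  -- full len(relation)-round iteration either way)
  let st := (List.range relation.length).foldl
      (fun st _ =>
        if st.2 then st
        else
          let new := sub.foldl (fun d kv => d.insert kv.1 (bCombine rel st.1 kv.1)) (PySem.Dict.mk [])
          if new = st.1 then (st.1, true) else (new, false))
      (init, false)
  bCombine rel st.1 element

-- ===== PRECONDITION & SPEC =====
-- Reachability by bounded iteration: reachN n S = S together with every node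
-- reachable from S along ≤ n relation edges.
def reachStep (relation : List (Int × List Int)) (S : List Int) : List Int :=
  S.foldl (fun acc x => PySem.Set.union acc ((PySem.Dict.mk relation).getD x [])) S

def reachN (relation : List (Int × List Int)) : Nat → List Int → List Int
  | 0, S => S
  | n + 1, S => reachN relation n (reachStep relation S)

-- Pre_ excludes exactly the inputs on which the Python A never returns: a key
-- reachable from `element` that lies on a cycle makes A's recursion infinite
-- (RecursionError). On every acyclic input A returns normally.
def Pre_element_variants (element : Int) (relation : List (Int × List Int)) : Prop :=
  ∀ p ∈ relation,
    p.1 ∈ reachN relation relation.length (PySem.Set.ofList [element]) →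
    p.1 ∉ reachN relation relation.length
        (PySem.Set.ofList ((PySem.Dict.mk relation).getD p.1 []))

instance (element : Int) (relation : List (Int × List Int)) : Decidable (Pre_element_variants element relation) := by
  unfold Pre_element_variants; infer_instance

def pvWitness_element_variants : Int × (List (Int × List Int)) :=
  (1, [(1, [2, 3]), (2, [3])])

def Spec_element_variants (element : Int) (relation : List (Int × List Int)) (out : List (List Int)) : Prop := out = element_variants_alt element relation
instance (element : Int) (relation : List (Int × List Int)) (out : List (List Int)) : Decidable (Spec_element_variants element relation out) := by unfold Spec_element_variants; infer_instance

-- ===== CLAIM (what is proved, stated in full; the proofs are below) =====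
def Claim_equal_element_variants : Prop := ∀ (element : Int) (relation : List (Int × List Int)), Dom_element_variants element relation → Pre_element_variants element relation → Spec_element_variants element relation (element_variants element relation)

-- ===== LEMMAS AND PROOFS =====

-- ---------- generic dedup/fold algebra ----------

-- The elements of X that are new w.r.t. the accumulated set s, in order.
def pvNew (s : List (List Int)) : List (List Int) → List (List Int)
  | [] => []
  | x :: X => if x ∈ s then pvNew s X else x :: pvNew (s ++ [x]) X

theorem pv_union_decomp (X : List (List Int)) : ∀ (s : List (List Int)),
    X.foldl PySem.Set.add s = s ++ pvNew s X := by
  induction X with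
  | nil => intro s; simp [pvNew]
  | cons x X ih =>
    intro s
    by_cases hx : x ∈ s
    · simp [pvNew, hx, List.foldl_cons, ih s]
    · simp [pvNew, hx, List.foldl_cons, ih (s ++ [x])]

theorem pv_fold_new (g : List Int → List Int) (X : List (List Int)) :
    ∀ (s r : List (List Int)), (∀ y ∈ s, g y ∈ r) →
      (pvNew s X).foldl (fun r v => PySem.Set.add r (g v)) r
        = X.foldl (fun r v => PySem.Set.add r (g v)) r := by
  induction X with
  | nil => intro s r _; rfl
  | cons x X ih =>
    intro s r h
    by_cases hx : x ∈ s
    · simp only [pvNew, if_pos hx, List.foldl_cons, PySem.Set.add_of_mem (h x hx)]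
      exact ih s r h
    · simp only [pvNew, if_neg hx, List.foldl_cons]
      refine ih (s ++ [x]) (PySem.Set.add r (g x)) ?_
      intro y hy
      rcases List.mem_append.mp hy with hy | hy
      · exact (PySem.Set.mem_add _ _ _).mpr (Or.inl (h y hy))
      · simp at hy; subst hy; exact (PySem.Set.mem_add _ _ _).mpr (Or.inr rfl)

theorem pv_fold_dedup (g : List Int → List Int) (X r : List (List Int)) :
    (X.foldl PySem.Set.add ([] : List (List Int))).foldl (fun r v => PySem.Set.add r (g v)) r
      = X.foldl (fun r v => PySem.Set.add r (g v)) r := by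
  rw [pv_union_decomp X []]
  simpa using pv_fold_new g X [] r (by simp)

theorem pv_fold_flatten (W : Int → List (List Int)) (g : List Int → List Int) (ts : List Int) :
    ∀ (r : List (List Int)),
      ts.foldl (fun r t => (W t).foldl (fun r v => PySem.Set.add r (g v)) r) r
        = ((ts.map W).flatten).foldl (fun r v => PySem.Set.add r (g v)) r := by
  induction ts with
  | nil => intro r; rfl
  | cons t ts ih => intro r; simp [List.foldl_append, ih]

theorem pv_union_flatten (W : Int → List (List Int)) (ts : List Int) :
    ∀ (m : List (List Int)),
      ts.foldl (fun m t => PySem.Set.union m (W t)) m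
        = ((ts.map W).flatten).foldl PySem.Set.add m := by
  induction ts with
  | nil => intro m; rfl
  | cons t ts ih =>
    intro m
    simp only [List.map_cons, List.flatten_cons, List.foldl_cons, List.foldl_append]
    exact ih _

theorem pv_foldl_congr {α β : Type} (l : List β) (f g : α → β → α) (i : α)
    (h : ∀ a, ∀ x ∈ l, f a x = g a x) : l.foldl f i = l.foldl g i := by
  induction l generalizing i with
  | nil => rfl
  | cons x l ih =>
    simp only [List.foldl_cons, h i x (by simp)]
    exact ih _ (fun a y hy => h a y (by simp [hy]))

theorem pv_isSome_iff (relation : List (Int × List Int)) (t : Int) :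
    ((PySem.Dict.mk relation).get? t).isSome ↔ t ∈ relation.map Prod.fst := by
  rw [← PySem.Dict.keys_mk relation]
  simp [← PySem.Dict.contains_eq_isSome_get?]

theorem evA_none {rel : PySem.Dict Int (List Int)} {e : Int} (h : rel.get? e = none)
    (fuel : Nat) : evA rel fuel e = [[e]] := by
  unfold evA; rw [h]; rfl

-- the central step: one combine with a table holding level-f values for the key
-- targets of e computes one more level of A's recursion
theorem combine_step (rel : PySem.Dict Int (List Int)) (tab : PySem.Dict Int (List (List Int)))
    (f : Nat) (e : Int)
    (inv : ∀ t ∈ rel.getD e [], (rel.get? t).isSome → tab.getD t [] = evA rel f t) :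
    bCombine rel tab e = evA rel (f + 1) e := by
  unfold bCombine
  cases h : rel.get? e with
  | none => rw [evA_none h]; rfl
  | some targets =>
    unfold evA
    rw [h]
    simp only []
    have hts : rel.getD e [] = targets := by
      rw [PySem.Dict.getD_eq_get?_getD, h]; rfl
    have hV : targets.foldl (fun merged t => PySem.Set.union merged
        (match rel.get? t with
         | some _ => tab.getD t []
         | none => ([[t]] : List (List Int)))) PySem.Set.empty
        = targets.foldl (fun merged t => PySem.Set.union merged (evA rel f t)) PySem.Set.empty := by
      refine pv_foldl_congr _ _ _ _ ?_
      intro merged t ht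
      cases hg : rel.get? t with
      | none => rw [evA_none hg]
      | some _ =>
        rw [inv t (hts ▸ ht) (by simp [hg])]
    rw [hV]
    -- both sides as folds over the flattened list of sub-variant lists
    have hR : targets.foldl (fun result target =>
          (evA rel f target).foldl (fun result variant =>
            PySem.Set.union result (PySem.Set.ofList [PySem.Set.union variant (PySem.Set.ofList [e])]))
            result) PySem.Set.empty
        = ((targets.map (evA rel f)).flatten).foldl
            (fun r v => PySem.Set.add r (PySem.Set.union v [e])) [] :=
      pv_fold_flatten (evA rel f) (fun v => PySem.Set.union v [e]) targets []
    rw [hR, pv_union_flatten (evA rel f) targets PySem.Set.empty]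
    have hL : PySem.Set.ofList
          ((((targets.map (evA rel f)).flatten).foldl PySem.Set.add PySem.Set.empty).map
            (fun v => PySem.Set.union v [e]))
        = ((((targets.map (evA rel f)).flatten).foldl PySem.Set.add ([] : List (List Int)))).foldl
            (fun r v => PySem.Set.add r (PySem.Set.union v [e])) [] := by
      rw [PySem.Set.ofList_eq_foldl, List.foldl_map]
      rfl
    rw [hL]
    exact pv_fold_dedup (fun v => PySem.Set.union v [e]) _ []

theorem pv_getD_build (c : Int → List (List Int)) :
    ∀ (l : List (Int × List Int)) (d0 : PySem.Dict Int (List (List Int))) (t : Int),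
      (l.foldl (fun d kv => d.insert kv.1 (c kv.1)) d0).getD t []
        = if t ∈ l.map Prod.fst then c t else d0.getD t [] := by
  intro l
  induction l with
  | nil => intro d0 t; simp
  | cons kv l ih =>
    intro d0 t
    simp only [List.foldl_cons, ih, List.map_cons, List.mem_cons]
    by_cases hl : t ∈ l.map Prod.fst
    · simp [hl]
    · rw [PySem.Dict.getD_insert]
      by_cases hk : t = kv.1
      · simp [hk]
      · simp [hk, hl]

-- ---------- reachable-set machinery ----------

def pvSIter (rel : PySem.Dict Int (List Int)) (element : Int) : Nat → PySem.Set Int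
  | 0 => PySem.Set.ofList [element]
  | i + 1 => expandStep rel (pvSIter rel element i)

theorem pv_prefix_fold_add (t : List Int) : ∀ (s : List Int), s <+: t.foldl PySem.Set.add s := by
  induction t with
  | nil => intro s; exact List.prefix_rfl
  | cons x t ih =>
    intro s
    refine List.IsPrefix.trans ?_ (ih (PySem.Set.add s x))
    rw [PySem.Set.add_eq_ite]
    split
    · exact List.prefix_rfl
    · exact ⟨[x], rfl⟩

theorem pv_prefix_union (s t : List Int) : s <+: PySem.Set.union s t :=
  pv_prefix_fold_add t s

theorem pv_prefix_expand_fold (xs : List Int) (rel : PySem.Dict Int (List Int)) :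
    ∀ (acc : List Int), acc <+: xs.foldl (fun a x => PySem.Set.union a (rel.getD x [])) acc := by
  induction xs with
  | nil => intro acc; exact List.prefix_rfl
  | cons x xs ih =>
    intro acc
    exact List.IsPrefix.trans (pv_prefix_union acc (rel.getD x [])) (ih _)

theorem pv_prefix_expandStep (rel : PySem.Dict Int (List Int)) (S : PySem.Set Int) :
    S <+: expandStep rel S :=
  pv_prefix_expand_fold S rel S

theorem pv_mem_expandStep_of_mem {rel : PySem.Dict Int (List Int)} {S : PySem.Set Int} {x : Int}
    (h : x ∈ S) : x ∈ expandStep rel S :=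
  (pv_prefix_expandStep rel S).subset h

theorem pv_mem_expand_fold_target (rel : PySem.Dict Int (List Int)) (t : Int) :
    ∀ (xs : List Int) (acc : List Int) (k : Int), k ∈ xs → t ∈ rel.getD k [] →
      t ∈ xs.foldl (fun a x => PySem.Set.union a (rel.getD x [])) acc := by
  intro xs
  induction xs with
  | nil => intro acc k hk; simp at hk
  | cons x xs ih =>
    intro acc k hk ht
    rcases List.mem_cons.mp hk with hk | hk
    · subst hk
      simp only [List.foldl_cons]
      refine (pv_prefix_expand_fold xs rel _).subset ?_
      exact (PySem.Set.mem_union _ _ _).mpr (Or.inr ht)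
    · exact ih _ k hk ht

theorem pv_mem_expandStep_target {rel : PySem.Dict Int (List Int)} {S : PySem.Set Int}
    {k t : Int} (hk : k ∈ S) (ht : t ∈ rel.getD k []) : t ∈ expandStep rel S :=
  pv_mem_expand_fold_target rel t S S k hk ht

theorem pv_mem_expand_fold_cases (rel : PySem.Dict Int (List Int)) (y : Int) :
    ∀ (xs : List Int) (acc : List Int),
      y ∈ xs.foldl (fun a x => PySem.Set.union a (rel.getD x [])) acc →
      y ∈ acc ∨ ∃ k ∈ xs, y ∈ rel.getD k [] := by
  intro xs
  induction xs with
  | nil => intro acc h; exact Or.inl h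
  | cons x xs ih =>
    intro acc h
    rcases ih _ h with h' | ⟨k, hk, hy⟩
    · rcases (PySem.Set.mem_union _ _ _).mp h' with h'' | h''
      · exact Or.inl h''
      · exact Or.inr ⟨x, by simp, h''⟩
    · exact Or.inr ⟨k, by simp [hk], hy⟩

theorem pv_nodup_expand_fold (rel : PySem.Dict Int (List Int)) :
    ∀ (xs : List Int) (acc : List Int), acc.Nodup →
      (xs.foldl (fun a x => PySem.Set.union a (rel.getD x [])) acc).Nodup := by
  intro xs
  induction xs with
  | nil => intro acc h; exact h
  | cons x xs ih =>
    intro acc h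
    exact ih _ (PySem.Set.nodup_union _ _ h)

theorem pv_nodup_SIter (rel : PySem.Dict Int (List Int)) (element : Int) :
    ∀ i, (pvSIter rel element i).Nodup := by
  intro i
  induction i with
  | zero => exact PySem.Set.nodup_ofList _
  | succ i ih => exact pv_nodup_expand_fold rel _ _ ih

theorem pv_getD_subset (relation : List (Int × List Int)) {k t : Int}
    (ht : t ∈ (PySem.Dict.mk relation).getD k []) :
    t ∈ (relation.map (fun kv => kv.2)).flatten := by
  cases hg : (PySem.Dict.mk relation).get? k with
  | none => rw [PySem.Dict.getD_eq_get?_getD, hg] at ht; simp at ht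
  | some v =>
    rw [PySem.Dict.getD_eq_get?_getD, hg] at ht
    simp only [Option.getD_some] at ht
    have hv : (k, v) ∈ relation := PySem.Dict.mem_items_of_get?_eq_some _ hg
    exact List.mem_flatten.mpr ⟨v, List.mem_map.mpr ⟨(k, v), hv, rfl⟩, ht⟩

theorem pv_SIter_subset (relation : List (Int × List Int)) (element : Int) :
    ∀ i, pvSIter (PySem.Dict.mk relation) element i
      ⊆ element :: (relation.map (fun kv => kv.2)).flatten := by
  intro i
  induction i with
  | zero => intro x hx; simp [pvSIter, PySem.Set.ofList] at hx; simp [hx]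
  | succ i ih =>
    intro x hx
    rcases pv_mem_expand_fold_cases _ x _ _ hx with hx' | ⟨k, _, hx'⟩
    · exact ih hx'
    · exact List.mem_cons_of_mem _ (pv_getD_subset relation hx')

theorem pv_nodup_length_le {S U : List Int} (h1 : S.Nodup) (h2 : S ⊆ U) :
    S.length ≤ U.length := by
  calc S.length = S.toFinset.card := (List.toFinset_card_of_nodup h1).symm
    _ ≤ U.toFinset.card := Finset.card_le_card (fun x hx => List.mem_toFinset.mpr (h2 (List.mem_toFinset.mp hx)))
    _ ≤ U.length := List.toFinset_card_le _

theorem pv_equal_of_equal_prefix {S T : List Int} (hp : S <+: T) (hnd : T.Nodup)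
    (hm : ∀ x, x ∈ T ↔ x ∈ S) : T = S := by
  obtain ⟨r, hr⟩ := hp
  subst hr
  have hdisj : ∀ a ∈ S, ∀ b ∈ r, a ≠ b := (List.nodup_append.mp hnd).2.2
  cases r with
  | nil => simp
  | cons y r =>
    exfalso
    have hy : y ∈ S := (hm y).mp (by simp)
    exact hdisj y hy y (by simp) rfl

theorem pv_fix_exists (relation : List (Int × List Int)) (element : Int) :
    ∃ i ≤ (element :: (relation.map (fun kv => kv.2)).flatten).length,
      pvSIter (PySem.Dict.mk relation) element i
        = pvSIter (PySem.Dict.mk relation) element (i + 1) := by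
  set M := (element :: (relation.map (fun kv => kv.2)).flatten).length with hM
  by_contra hc
  push Not at hc
  have hlen : ∀ i, i ≤ M + 1 → i + 1 ≤ (pvSIter (PySem.Dict.mk relation) element i).length := by
    intro i
    induction i with
    | zero => intro _; simp [pvSIter, PySem.Set.ofList]
    | succ i ih =>
      intro hi
      have hpre : pvSIter (PySem.Dict.mk relation) element i
          <+: pvSIter (PySem.Dict.mk relation) element (i + 1) :=
        pv_prefix_expandStep _ _
      have hne := hc i (by omega)
      have hlt : (pvSIter (PySem.Dict.mk relation) element i).length
          < (pvSIter (PySem.Dict.mk relation) element (i + 1)).length := by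
        rcases Nat.lt_or_ge (pvSIter (PySem.Dict.mk relation) element i).length
            (pvSIter (PySem.Dict.mk relation) element (i + 1)).length with h | h
        · exact h
        · exact absurd (List.IsPrefix.eq_of_length hpre
            (Nat.le_antisymm hpre.length_le h)) hne
      have := ih (by omega)
      omega
  have h1 := hlen (M + 1) (by omega)
  have h2 := pv_nodup_length_le (pv_nodup_SIter (PySem.Dict.mk relation) element (M + 1))
      (pv_SIter_subset relation element (M + 1))
  rw [← hM] at h2
  omega

theorem pv_fix_propagate (rel : PySem.Dict Int (List Int)) (element : Int) {i : Nat}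
    (h : pvSIter rel element i = pvSIter rel element (i + 1)) :
    ∀ j, i ≤ j → pvSIter rel element j = pvSIter rel element (j + 1) := by
  intro j hj
  induction j, hj using Nat.le_induction with
  | base => exact h
  | succ j _ ih =>
    show expandStep rel (pvSIter rel element j) = expandStep rel (pvSIter rel element (j + 1))
    exact congrArg (expandStep rel) ih

-- the Boolean set comparison in the while-loop detects exactly a list-level fixpoint
theorem pv_equal_detects (rel : PySem.Dict Int (List Int)) (S : PySem.Set Int) (hnd : S.Nodup)
    (h : PySem.Set.equal (expandStep rel S) S = true) : expandStep rel S = S := by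
  have hm := (PySem.Set.equal_iff _ _).mp h
  exact pv_equal_of_equal_prefix (pv_prefix_expandStep rel S)
    (pv_nodup_expand_fold rel S S hnd) hm

theorem pv_reachflag_done (rel : PySem.Dict Int (List Int)) :
    ∀ (l : List Nat) (S : PySem.Set Int),
      l.foldl (fun st (_ : Nat) =>
          if st.2 then st
          else if PySem.Set.equal (expandStep rel st.1) st.1 then (st.1, true)
          else (expandStep rel st.1, false)) (S, true) = (S, true) := by
  intro l
  induction l with
  | nil => intro S; rfl
  | cons _ l ih => intro S; simpa using ih S

-- the while-loop's final set is some iterate of expandStep, and it is a fixpoint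
-- whenever the break fired
theorem pv_reach_fold (relation : List (Int × List Int)) (element : Int) :
    ∀ (l : List Nat) (j : Nat), ∃ j',
      (l.foldl (fun st (_ : Nat) =>
          if st.2 then st
          else if PySem.Set.equal (expandStep (PySem.Dict.mk relation) st.1) st.1 then (st.1, true)
          else (expandStep (PySem.Dict.mk relation) st.1, false))
        (pvSIter (PySem.Dict.mk relation) element j, false)
        = (pvSIter (PySem.Dict.mk relation) element j', false) ∧ j' = j + l.length)
      ∨ (l.foldl (fun st (_ : Nat) =>
          if st.2 then st
          else if PySem.Set.equal (expandStep (PySem.Dict.mk relation) st.1) st.1 then (st.1, true)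
          else (expandStep (PySem.Dict.mk relation) st.1, false))
        (pvSIter (PySem.Dict.mk relation) element j, false)
        = (pvSIter (PySem.Dict.mk relation) element j', true)
        ∧ expandStep (PySem.Dict.mk relation) (pvSIter (PySem.Dict.mk relation) element j')
            = pvSIter (PySem.Dict.mk relation) element j') := by
  intro l
  induction l with
  | nil => intro j; exact ⟨j, Or.inl ⟨rfl, by simp⟩⟩
  | cons _ l ih =>
    intro j
    by_cases hb : PySem.Set.equal
        (expandStep (PySem.Dict.mk relation) (pvSIter (PySem.Dict.mk relation) element j))
        (pvSIter (PySem.Dict.mk relation) element j) = true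
    · have hfix := pv_equal_detects _ _ (pv_nodup_SIter (PySem.Dict.mk relation) element j) hb
      refine ⟨j, Or.inr ⟨?_, hfix⟩⟩
      simp only [List.foldl_cons, if_neg (by simp : ¬ (false = true)), if_pos hb]
      exact pv_reachflag_done _ l _
    · obtain ⟨j', hj'⟩ := ih (j + 1)
      refine ⟨j', ?_⟩
      simp only [List.foldl_cons, if_neg (by simp : ¬ (false = true)), if_neg hb,
        List.length_cons]
      have hstep : expandStep (PySem.Dict.mk relation) (pvSIter (PySem.Dict.mk relation) element j)
          = pvSIter (PySem.Dict.mk relation) element (j + 1) := rfl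
      rw [hstep]
      rcases hj' with ⟨h1, h2⟩ | h
      · exact Or.inl ⟨h1, by omega⟩
      · exact Or.inr h

-- the reach set computed by B: contains element and is closed under the relation
theorem pv_reach_closed (relation : List (Int × List Int)) (element : Int) :
    let R := ((List.range ((element :: (relation.map (fun kv => kv.2)).flatten).length + 1)).foldl
      (fun st (_ : Nat) =>
        if st.2 then st
        else
          if PySem.Set.equal (expandStep (PySem.Dict.mk relation) st.1) st.1 then (st.1, true)
          else (expandStep (PySem.Dict.mk relation) st.1, false))
      (PySem.Set.ofList [element], false)).1
    element ∈ R ∧ expandStep (PySem.Dict.mk relation) R = R := by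
  intro R
  have hmem : ∀ j, element ∈ pvSIter (PySem.Dict.mk relation) element j := by
    intro j
    induction j with
    | zero => simp [pvSIter, PySem.Set.ofList]
    | succ j ih => exact pv_mem_expandStep_of_mem ih
  have h0 : pvSIter (PySem.Dict.mk relation) element 0 = PySem.Set.ofList [element] := rfl
  obtain ⟨j', hj'⟩ := pv_reach_fold relation element
    (List.range ((element :: (relation.map (fun kv => kv.2)).flatten).length + 1)) 0
  rcases hj' with ⟨h1, h2⟩ | ⟨h1, h2⟩
  · -- the loop ran out of fuel without breaking: the iterate is a fixpoint anyway
    have hR : R = pvSIter (PySem.Dict.mk relation) element j' := by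
      show (_ : (PySem.Set Int) × Bool).1 = _
      rw [← h0, h1]
    obtain ⟨i, hi, hfix⟩ := pv_fix_exists relation element
    have hprop := pv_fix_propagate (PySem.Dict.mk relation) element hfix j' (by
      rw [List.length_range] at h2
      omega)
    refine ⟨hR ▸ hmem j', ?_⟩
    rw [hR]
    exact hprop.symm
  · have hR : R = pvSIter (PySem.Dict.mk relation) element j' := by
      show (_ : (PySem.Set Int) × Bool).1 = _
      rw [← h0, h1]
    exact ⟨hR ▸ hmem j', hR ▸ h2⟩

-- ---------- table-loop machinery ----------

-- once the loop state is flagged as done, nothing changes any more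
theorem pv_flag_done (F : PySem.Dict Int (List (List Int)) → PySem.Dict Int (List (List Int))) :
    ∀ (l : List Nat) (tab : PySem.Dict Int (List (List Int))),
      l.foldl (fun st (_ : Nat) =>
          if st.2 then st
          else if F st.1 = st.1 then (st.1, true) else (F st.1, false))
        (tab, true) = (tab, true) := by
  intro l
  induction l with
  | nil => intro tab; rfl
  | cons _ l ih => intro tab; simpa using ih tab

theorem pv_fix_iter (F : PySem.Dict Int (List (List Int)) → PySem.Dict Int (List (List Int))) :
    ∀ (l : List Nat) (tab : PySem.Dict Int (List (List Int))), F tab = tab →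
      l.foldl (fun tab (_ : Nat) => F tab) tab = tab := by
  intro l
  induction l with
  | nil => intro tab _; rfl
  | cons _ l ih => intro tab h; simp only [List.foldl_cons, h]; exact ih tab h

-- breaking at a fixpoint returns the same table as running all the rounds
theorem pv_flag_eq_plain (F : PySem.Dict Int (List (List Int)) → PySem.Dict Int (List (List Int))) :
    ∀ (l : List Nat) (tab : PySem.Dict Int (List (List Int))),
      (l.foldl (fun st (_ : Nat) =>
          if st.2 then st
          else if F st.1 = st.1 then (st.1, true) else (F st.1, false))
        (tab, false)).1 = l.foldl (fun tab (_ : Nat) => F tab) tab := by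
  intro l
  induction l with
  | nil => intro tab; rfl
  | cons _ l ih =>
    intro tab
    by_cases h : F tab = tab
    · have hdone := pv_flag_done F l tab
      have hfix := pv_fix_iter F l tab h
      simp [List.foldl_cons, h, hdone, hfix]
    · simp only [List.foldl_cons, if_neg (by simp : ¬ (false = true)), if_neg h]
      exact ih (F tab)

theorem pv_key_mem_sub (relation : List (Int × List Int)) (R : PySem.Set Int) {t : Int}
    (hkey : ((PySem.Dict.mk relation).get? t).isSome) (hR : t ∈ R) :
    t ∈ (relation.filter (fun kv => PySem.Set.contains R kv.1)).map Prod.fst := by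
  have hmem := (pv_isSome_iff relation t).mp hkey
  obtain ⟨kv, hkv, hfst⟩ := List.mem_map.mp hmem
  refine List.mem_map.mpr ⟨kv, List.mem_filter.mpr ⟨hkv, ?_⟩, hfst⟩
  rw [hfst] at *
  simpa [PySem.Set.contains_eq_listContains] using hR

-- the round invariant over the reachable keys: after i rounds the table holds
-- level-i values for every key in the (closed) reach set R
theorem pv_rounds (relation : List (Int × List Int)) (R : PySem.Set Int)
    (hclosed : expandStep (PySem.Dict.mk relation) R = R) :
    ∀ (l : List Nat) (tab : PySem.Dict Int (List (List Int))) (f : Nat),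
      (∀ t, ((PySem.Dict.mk relation).get? t).isSome → t ∈ R →
          tab.getD t [] = evA (PySem.Dict.mk relation) f t) →
      (∀ t, ((PySem.Dict.mk relation).get? t).isSome → t ∈ R →
          (l.foldl (fun tab (_ : Nat) =>
              (relation.filter (fun kv => PySem.Set.contains R kv.1)).foldl
                (fun d kv => d.insert kv.1 (bCombine (PySem.Dict.mk relation) tab kv.1))
                (PySem.Dict.mk [])) tab).getD t []
            = evA (PySem.Dict.mk relation) (f + l.length) t) := by
  intro l
  induction l with
  | nil => intro tab f h t ht hR; simpa using h t ht hR
  | cons _ l ih =>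
    intro tab f h t ht hR
    have hstep : ∀ t, ((PySem.Dict.mk relation).get? t).isSome → t ∈ R →
        ((relation.filter (fun kv => PySem.Set.contains R kv.1)).foldl
            (fun d kv => d.insert kv.1 (bCombine (PySem.Dict.mk relation) tab kv.1))
            (PySem.Dict.mk [])).getD t []
          = evA (PySem.Dict.mk relation) (f + 1) t := by
      intro t ht hR
      rw [pv_getD_build (fun k => bCombine (PySem.Dict.mk relation) tab k) _ (PySem.Dict.mk []) t,
        if_pos (pv_key_mem_sub relation R ht hR)]
      refine combine_step (PySem.Dict.mk relation) tab f t ?_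
      intro t' ht' hkey'
      refine h t' hkey' ?_
      rw [← hclosed]
      exact pv_mem_expandStep_target hR ht'
    have hrec := ih _ (f + 1) hstep t ht hR
    simp only [List.foldl_cons, List.length_cons]
    have harith : f + 1 + l.length = f + (l.length + 1) := by omega
    rw [harith] at hrec
    exact hrec

theorem evA_key_zero {rel : PySem.Dict Int (List Int)} {t : Int}
    (ht : (rel.get? t).isSome) : evA rel 0 t = [] := by
  unfold evA
  cases h : rel.get? t with
  | none => rw [h] at ht; simp at ht
  | some _ => simp

theorem ports_agree (element : Int) (relation : List (Int × List Int)) :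
    element_variants element relation = element_variants_alt element relation := by
  unfold element_variants element_variants_alt
  simp only []
  obtain ⟨hmem, hclosed⟩ := pv_reach_closed relation element
  set R := ((List.range ((element :: (relation.map (fun kv => kv.2)).flatten).length + 1)).foldl
      (fun st (_ : Nat) =>
        if st.2 then st
        else
          if PySem.Set.equal (expandStep (PySem.Dict.mk relation) st.1) st.1 then (st.1, true)
          else (expandStep (PySem.Dict.mk relation) st.1, false))
      (PySem.Set.ofList [element], false)).1 with hRdef
  rw [pv_flag_eq_plain
    (fun tab => (relation.filter (fun kv => PySem.Set.contains R kv.1)).foldl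
      (fun d kv => d.insert kv.1 (bCombine (PySem.Dict.mk relation) tab kv.1)) (PySem.Dict.mk []))
    (List.range relation.length)]
  have hinit : ∀ t, ((PySem.Dict.mk relation).get? t).isSome → t ∈ R →
      (((relation.filter (fun kv => PySem.Set.contains R kv.1)).foldl
          (fun d kv => d.insert kv.1 []) (PySem.Dict.mk [])).getD t [])
        = evA (PySem.Dict.mk relation) 0 t := by
    intro t ht _
    rw [evA_key_zero ht, pv_getD_build (fun _ => []) _ (PySem.Dict.mk []) t]
    split <;> rfl
  have h := pv_rounds relation R hclosed (List.range relation.length) _ 0 hinit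
  simp only [List.length_range, Nat.zero_add] at h
  refine (combine_step (PySem.Dict.mk relation) _ relation.length element ?_).symm
  intro t ht hkey
  refine h t hkey ?_
  rw [← hclosed]
  exact pv_mem_expandStep_target hmem ht

-- ===== VERDICT (by name: the statement is the Claim_ definition above) =====
theorem element_variants_spec : Claim_equal_element_variants := by
  intro element relation _ _
  unfold Spec_element_variants
  exact ports_agree element relation
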